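-- pv_equiv track=rewrite | github.com/actions-marketplace-validations/F2iProject_vigil | src/vigil/diff_parser.py | find_best_file_for_finding
-- ===== SOURCE A (Python) =====
-- def find_best_file_for_finding(
--     finding_file: str,
--     valid_lines: dict[str, set[int]],
-- ) -> tuple[str, int] | None:
--     """When a finding's file is not in the diff, find the best file to attach it to.
--
--     Strategy:
--     1. Fuzzy match by filename (e.g. file was renamed, or path differs)
--     2. Fall back to the first file alphabetically in the diff
--
--     Returns (file_path, first_commentable_line) or None if diff is empty.
--     """
--     if not valid_lines:
--         return None
--
--     # Try matching by basename
--     from pathlib import PurePosixPath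
--     finding_name = PurePosixPath(finding_file).name
--     for path, lines in valid_lines.items():
--         if PurePosixPath(path).name == finding_name and lines:
--             return (path, min(lines))
--
--     # Fall back to first file in diff that has commentable lines
--     for path in sorted(valid_lines.keys()):
--         if valid_lines[path]:
--             return (path, min(valid_lines[path]))
--     return None
-- ===== SOURCE B (Python) =====
-- def _posix_name(path: str) -> str:
--     """PurePosixPath(path).name: last path component, with '' and '.' parts dropped."""
--     parts = [p for p in path.split("/") if p not in ("", ".")]
--     return parts[-1] if parts else ""
--
--
-- def find_best_file_for_finding(
--     finding_file: str,
--     valid_lines: dict[str, set[int]],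
-- ) -> tuple[str, int] | None:
--     """Single pass: track the first basename match and the alphabetically
--     smallest non-empty file simultaneously; no sort, no second scan."""
--     name = _posix_name(finding_file)
--     match = None
--     best = None
--     for path, lines in valid_lines.items():
--         if not lines:
--             continue
--         low = min(lines)
--         if match is None and _posix_name(path) == name:
--             match = (path, low)
--         if best is None or path < best[0]:
--             best = (path, low)
--     return match if match is not None else best
-- ===== Notes on version B (the rewrite author's own statement) =====
-- stated objective: alternative
-- what changed: Replaces A's two separate scans (basename-match loop, then sorted(keys) plus first-non-empty scan) with a single pass over the dict items that simultaneously tracks the first basename match and the alphabetically smallest file with commentable lines, eliminating the sort.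
import Mathlib
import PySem

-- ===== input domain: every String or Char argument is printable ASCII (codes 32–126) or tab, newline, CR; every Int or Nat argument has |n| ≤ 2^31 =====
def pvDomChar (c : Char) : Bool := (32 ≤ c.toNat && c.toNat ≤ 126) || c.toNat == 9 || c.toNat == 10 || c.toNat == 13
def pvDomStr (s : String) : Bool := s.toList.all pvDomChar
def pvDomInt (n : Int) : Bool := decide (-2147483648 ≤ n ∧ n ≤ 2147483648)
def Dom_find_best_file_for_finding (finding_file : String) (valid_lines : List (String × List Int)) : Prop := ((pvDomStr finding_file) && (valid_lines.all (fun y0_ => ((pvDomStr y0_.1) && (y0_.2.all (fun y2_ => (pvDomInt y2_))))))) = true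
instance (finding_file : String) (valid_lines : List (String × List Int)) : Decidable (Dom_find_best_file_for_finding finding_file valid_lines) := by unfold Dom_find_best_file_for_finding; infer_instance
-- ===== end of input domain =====

-- B replaces A's separate basename loop plus sort-then-scan fallback by ONE pass that tracks
-- the first basename match and the alphabetically smallest non-empty file simultaneously (objective: alternative/simpler).

-- ===== PORT A =====
-- hand port of PurePosixPath(s).name: last path component after dropping '' and '.' parts
-- (exact for POSIX pure paths: name = last element of the parts after the root)
def posixName (s : String) : String :=
  (((PySem.Str.split? s "/").getD []).filter (fun p => decide (p ≠ "" ∧ p ≠ "."))).getLastD ""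

-- min(lines) on a non-empty set of ints (callers guard non-emptiness, as Python does)
def pyMin (l : List Int) : Int := (PySem.List.min? l (fun x => x)).getD 0

-- first basename-match loop of A
def findMatch (name : String) : List (String × List Int) → Option (String × Int)
  | [] => none
  | (p, ls) :: rest =>
    if posixName p = name ∧ ls ≠ [] then some (p, pyMin ls) else findMatch name rest

-- fallback loop of A over the sorted key list, with dict lookup valid_lines[path]
def findFallback (vl : List (String × List Int)) : List String → Option (String × Int)
  | [] => none
  | k :: rest =>
    let v := (List.lookup k vl).getD []
    if v ≠ [] then some (k, pyMin v) else findFallback vl rest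

def find_best_file_for_finding (finding_file : String) (valid_lines : List (String × List Int)) : Option (String × Int) :=
  if valid_lines = [] then none
  else
    match findMatch (posixName finding_file) valid_lines with
    | some r => some r
    | none => findFallback valid_lines (PySem.List.sorted (valid_lines.map Prod.fst) (fun x => x))

-- ===== PORT B =====
-- loop body of B: skip empty line sets, record first basename match, keep smallest path seen
def stepB (name : String) (st : Option (String × Int) × Option (String × Int))
    (pl : String × List Int) : Option (String × Int) × Option (String × Int) :=
  if pl.2 = [] then st
  else
    let mn := pyMin pl.2
    ((if st.1 = none ∧ posixName pl.1 = name then some (pl.1, mn) else st.1),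
     (match st.2 with
      | none => some (pl.1, mn)
      | some bb => if pl.1 < bb.1 then some (pl.1, mn) else st.2))

def find_best_file_for_finding_alt (finding_file : String) (valid_lines : List (String × List Int)) : Option (String × Int) :=
  let name := posixName finding_file
  let st := valid_lines.foldl (stepB name) (none, none)
  match st.1 with
  | some r => some r
  | none => st.2

-- ===== PRECONDITION & SPEC =====
-- Pre_ only requires the association list to have pairwise-distinct keys, i.e. to actually
-- represent a Python dict (a dict can never contain duplicate keys, so nothing A accepts is excluded).
def Pre_find_best_file_for_finding (finding_file : String) (valid_lines : List (String × List Int)) : Prop :=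
  (valid_lines.map Prod.fst).Nodup

instance (finding_file : String) (valid_lines : List (String × List Int)) : Decidable (Pre_find_best_file_for_finding finding_file valid_lines) := by
  unfold Pre_find_best_file_for_finding; infer_instance

def pvWitness_find_best_file_for_finding : String × (List (String × List Int)) :=
  ("src/a.py", [("lib/b.py", []), ("lib/a.py", [7, 3])])

def Spec_find_best_file_for_finding (finding_file : String) (valid_lines : List (String × List Int)) (out : Option (String × Int)) : Prop := out = find_best_file_for_finding_alt finding_file valid_lines
instance (finding_file : String) (valid_lines : List (String × List Int)) (out : Option (String × Int)) : Decidable (Spec_find_best_file_for_finding finding_file valid_lines out) := by unfold Spec_find_best_file_for_finding; infer_instance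

-- ===== CLAIM (what is proved, stated in full; the proofs are below) =====
def Claim_equal_find_best_file_for_finding : Prop := ∀ (finding_file : String) (valid_lines : List (String × List Int)), Dom_find_best_file_for_finding finding_file valid_lines → Pre_find_best_file_for_finding finding_file valid_lines → Spec_find_best_file_for_finding finding_file valid_lines (find_best_file_for_finding finding_file valid_lines)

-- ===== LEMMAS AND PROOFS =====

theorem pvWitness_ok :
    Dom_find_best_file_for_finding pvWitness_find_best_file_for_finding.1 pvWitness_find_best_file_for_finding.2 ∧
    Pre_find_best_file_for_finding pvWitness_find_best_file_for_finding.1 pvWitness_find_best_file_for_finding.2 := by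
  decide

-- the fallback accumulator of B's loop, in isolation
def step2 (b : Option (String × Int)) (pl : String × List Int) : Option (String × Int) :=
  if pl.2 = [] then b
  else
    match b with
    | none => some (pl.1, pyMin pl.2)
    | some bb => if pl.1 < bb.1 then some (pl.1, pyMin pl.2) else b

def bestFold (b : Option (String × Int)) (vl : List (String × List Int)) : Option (String × Int) :=
  vl.foldl step2 b

theorem stepB_snd (name : String) (st : Option (String × Int) × Option (String × Int))
    (pl : String × List Int) : (stepB name st pl).2 = step2 st.2 pl := by
  by_cases h : pl.2 = [] <;> simp [stepB, step2, h]

theorem step2_eq_none (b : Option (String × Int)) (pl : String × List Int) :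
    step2 b pl = none ↔ b = none ∧ pl.2 = [] := by
  cases b <;> by_cases h : pl.2 = [] <;> simp [step2, h] <;> split <;> simp

theorem step2_some {b : Option (String × Int)} {pl : String × List Int} {bb' : String × Int}
    (hs : step2 b pl = some bb') :
    (b = some bb' ∨ (bb' = (pl.1, pyMin pl.2) ∧ pl.2 ≠ [])) ∧
    (∀ bb, b = some bb → bb'.1 ≤ bb.1) ∧
    (pl.2 ≠ [] → bb'.1 ≤ pl.1) := by
  cases b with
  | none =>
    by_cases hpl : pl.2 = []
    · simp only [step2, if_pos hpl] at hs
      exact absurd hs (by simp)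
    · simp only [step2, if_neg hpl] at hs
      injection hs with hs
      subst hs
      exact ⟨Or.inr ⟨rfl, hpl⟩, fun bb h => absurd h (by simp), fun _ => le_refl _⟩
  | some bb =>
    by_cases hpl : pl.2 = []
    · simp only [step2, if_pos hpl] at hs
      injection hs with hs
      subst hs
      refine ⟨Or.inl rfl, ?_, fun h => absurd hpl h⟩
      rintro bb2 h
      injection h with h
      subst h
      exact le_refl _
    · simp only [step2, if_neg hpl] at hs
      by_cases hlt : pl.1 < bb.1
      · rw [if_pos hlt] at hs
        injection hs with hs
        subst hs
        refine ⟨Or.inr ⟨rfl, hpl⟩, ?_, fun _ => le_refl _⟩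
        rintro bb2 h
        injection h with h
        subst h
        exact le_of_lt hlt
      · rw [if_neg hlt] at hs
        injection hs with hs
        subst hs
        refine ⟨Or.inl rfl, ?_, fun _ => not_lt.mp hlt⟩
        rintro bb2 h2
        injection h2 with h2
        subst h2
        exact le_refl _

theorem foldB_fst (name : String) : ∀ (vl : List (String × List Int)) (m b : Option (String × Int)),
    (List.foldl (stepB name) (m, b) vl).1 =
      (match m with | some r => some r | none => findMatch name vl) := by
  intro vl
  induction vl with
  | nil => intro m b; cases m <;> simp [findMatch]
  | cons pl rest ih =>
    intro m b
    obtain ⟨p, ls⟩ := pl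
    by_cases hls : ls = []
    · subst hls
      simp only [List.foldl_cons]
      rw [show stepB name (m, b) (p, ([] : List Int)) = (m, b) from by simp [stepB]]
      rw [ih]
      cases m <;> simp [findMatch]
    · simp only [List.foldl_cons]
      cases m with
      | some r =>
        rw [show stepB name (some r, b) (p, ls) = (some r, (stepB name (some r, b) (p, ls)).2) from by
          simp [stepB, hls]]
        rw [ih]
      | none =>
        by_cases hn : posixName p = name
        · rw [show stepB name (none, b) (p, ls) =
              (some (p, pyMin ls), (stepB name (none, b) (p, ls)).2) from by simp [stepB, hls, hn]]
          rw [ih]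
          simp [findMatch, hn, hls]
        · rw [show stepB name (none, b) (p, ls) =
              (none, (stepB name (none, b) (p, ls)).2) from by simp [stepB, hls, hn]]
          rw [ih]
          simp [findMatch, hn]

theorem foldB_snd (name : String) : ∀ (vl : List (String × List Int)) (m b : Option (String × Int)),
    (List.foldl (stepB name) (m, b) vl).2 = bestFold b vl := by
  intro vl
  induction vl with
  | nil => intro m b; simp [bestFold]
  | cons pl rest ih =>
    intro m b
    simp only [List.foldl_cons]
    have h1 := ih (stepB name (m, b) pl).1 (stepB name (m, b) pl).2
    rw [show ((stepB name (m, b) pl).1, (stepB name (m, b) pl).2) = stepB name (m, b) pl from rfl] at h1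
    rw [h1, stepB_snd]
    simp [bestFold]

theorem bestFold_none_iff : ∀ (vl : List (String × List Int)) (b : Option (String × Int)),
    bestFold b vl = none ↔ (b = none ∧ ∀ pl ∈ vl, pl.2 = []) := by
  intro vl
  induction vl with
  | nil => intro b; simp [bestFold]
  | cons pl rest ih =>
    intro b
    rw [show bestFold b (pl :: rest) = bestFold (step2 b pl) rest from by simp [bestFold], ih,
      step2_eq_none]
    constructor
    · rintro ⟨⟨hb, hpl⟩, hrest⟩
      refine ⟨hb, ?_⟩
      intro q hq
      rcases List.mem_cons.mp hq with h | h
      · exact h ▸ hpl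
      · exact hrest q h
    · rintro ⟨hb, hall⟩
      exact ⟨⟨hb, hall pl (by simp)⟩, fun q hq => hall q (by simp [hq])⟩

theorem bestFold_some : ∀ (vl : List (String × List Int)) (b : Option (String × Int)) (p : String) (m : Int),
    bestFold b vl = some (p, m) →
      ((b = some (p, m)) ∨ (∃ ls, (p, ls) ∈ vl ∧ ls ≠ [] ∧ m = pyMin ls)) ∧
      (∀ ql ∈ vl, ql.2 ≠ [] → p ≤ ql.1) ∧
      (∀ bb, b = some bb → p ≤ bb.1) := by
  intro vl
  induction vl with
  | nil =>
    intro b p m h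
    simp only [bestFold, List.foldl_nil] at h
    refine ⟨Or.inl h, by simp, ?_⟩
    rintro bb hbb
    rw [h] at hbb
    injection hbb with hbb
    subst hbb
    exact le_refl _
  | cons pl rest ih =>
    intro b p m h
    have hstep : bestFold (step2 b pl) rest = some (p, m) := by simpa [bestFold] using h
    obtain ⟨H1, H2, H3⟩ := ih (step2 b pl) p m hstep
    refine ⟨?_, ?_, ?_⟩
    · rcases H1 with H1 | ⟨ls, hmem, hne, hmeq⟩
      · obtain ⟨hcase, _, _⟩ := step2_some H1
        rcases hcase with hb | ⟨hbb, hne⟩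
        · exact Or.inl hb
        · injection hbb with h1 h2
          subst h1
          subst h2
          exact Or.inr ⟨pl.2, by simp, hne, rfl⟩
      · exact Or.inr ⟨ls, List.mem_cons_of_mem _ hmem, hne, hmeq⟩
    · intro ql hql hne
      rcases List.mem_cons.mp hql with h' | h'
      · subst h'
        rcases hs : step2 b ql with _ | bb'
        · rw [step2_eq_none] at hs
          exact absurd hs.2 hne
        · obtain ⟨_, _, h3⟩ := step2_some hs
          exact le_trans (H3 bb' hs) (h3 hne)
      · exact H2 ql h' hne
    · rintro bb rfl
      rcases hs : step2 (some bb) pl with _ | bb'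
      · rw [step2_eq_none] at hs
        simp at hs
      · obtain ⟨_, h2, _⟩ := step2_some hs
        exact le_trans (H3 bb' hs) (h2 bb rfl)

theorem findFallback_none_iff : ∀ (ks : List String) (vl : List (String × List Int)),
    findFallback vl ks = none ↔ ∀ k ∈ ks, (List.lookup k vl).getD [] = [] := by
  intro ks
  induction ks with
  | nil => intro vl; simp [findFallback]
  | cons k rest ih =>
    intro vl
    by_cases h : (List.lookup k vl).getD [] = []
    · simp [findFallback, h, ih]
    · simp only [findFallback, if_pos h]
      simp only [reduceCtorEq, false_iff, not_forall]
      exact ⟨k, by simp, h⟩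

theorem findFallback_some : ∀ (ks : List String) (vl : List (String × List Int)) (q : String) (n : Int),
    ks.Pairwise (· ≤ ·) → findFallback vl ks = some (q, n) →
      q ∈ ks ∧ (List.lookup q vl).getD [] ≠ [] ∧ n = pyMin ((List.lookup q vl).getD []) ∧
      (∀ k ∈ ks, (List.lookup k vl).getD [] ≠ [] → q ≤ k) := by
  intro ks
  induction ks with
  | nil => intro vl q n _ h; simp [findFallback] at h
  | cons k rest ih =>
    intro vl q n hpw h
    rw [List.pairwise_cons] at hpw
    obtain ⟨hk, hrest⟩ := hpw
    by_cases hv : (List.lookup k vl).getD [] = []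
    · have h' : findFallback vl rest = some (q, n) := by simpa [findFallback, hv] using h
      obtain ⟨h1, h2, h3, h4⟩ := ih vl q n hrest h'
      refine ⟨List.mem_cons_of_mem _ h1, h2, h3, ?_⟩
      intro k' hk' hne
      rcases List.mem_cons.mp hk' with h2' | h2'
      · exact absurd (h2' ▸ hv) hne
      · exact h4 k' h2' hne
    · have h' : some (k, pyMin ((List.lookup k vl).getD [])) = some (q, n) := by
        simpa [findFallback, hv] using h
      rw [Option.some.injEq, Prod.mk.injEq] at h'
      obtain ⟨rfl, rfl⟩ := h'
      refine ⟨by simp, hv, rfl, ?_⟩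
      intro k' hk' _
      rcases List.mem_cons.mp hk' with h2' | h2'
      · exact le_of_eq h2'.symm
      · exact hk k' h2'

theorem lookup_mem {vl : List (String × List Int)} {k : String} {ls : List Int}
    (h : List.lookup k vl = some ls) : (k, ls) ∈ vl := by
  induction vl with
  | nil => simp [List.lookup] at h
  | cons pl rest ih =>
    obtain ⟨a, bs⟩ := pl
    by_cases hak : k = a
    · subst hak
      simp [List.lookup] at h
      simp [h]
    · have hba : (k == a) = false := beq_eq_false_iff_ne.mpr hak
      simp only [List.lookup, hba] at h
      exact List.mem_cons_of_mem _ (ih h)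

theorem lookup_of_nodup {vl : List (String × List Int)} {k : String} {ls : List Int}
    (hnd : (vl.map Prod.fst).Nodup) (h : (k, ls) ∈ vl) : List.lookup k vl = some ls := by
  induction vl with
  | nil => simp at h
  | cons pl rest ih =>
    obtain ⟨a, bs⟩ := pl
    rw [List.map_cons, List.nodup_cons] at hnd
    obtain ⟨hna, hnd'⟩ := hnd
    rcases List.mem_cons.mp h with h' | h'
    · rw [Prod.mk.injEq] at h'
      obtain ⟨rfl, rfl⟩ := h'
      simp [List.lookup]
    · have hka : k ≠ a := by
        rintro rfl
        exact hna (List.mem_map.mpr ⟨(k, ls), h', rfl⟩)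
      have hba : (k == a) = false := beq_eq_false_iff_ne.mpr hka
      simp only [List.lookup, hba]
      exact ih hnd' h'

-- ===== VERDICT (by name: the statement is the Claim_ definition above) =====
theorem find_best_file_for_finding_spec : Claim_equal_find_best_file_for_finding := by
  intro ff vl _ hpre
  unfold Spec_find_best_file_for_finding
  unfold Pre_find_best_file_for_finding at hpre
  by_cases hvl : vl = []
  · subst hvl; rfl
  · have hfst := foldB_fst (posixName ff) vl none none
    have hsnd := foldB_snd (posixName ff) vl none none
    unfold find_best_file_for_finding find_best_file_for_finding_alt
    simp only [if_neg hvl]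
    cases hm : findMatch (posixName ff) vl with
    | some r =>
      rw [hm] at hfst
      simp only [hfst]
    | none =>
      rw [hm] at hfst
      simp only [hfst, hsnd]
      have hperm := PySem.List.sorted_perm (vl.map Prod.fst) (fun x => x) false
      have hpw := PySem.List.sorted_pairwise (vl.map Prod.fst) (fun x => x)
      cases hA : findFallback vl (PySem.List.sorted (vl.map Prod.fst) (fun x => x)) with
      | none =>
        cases hB : bestFold none vl with
        | none => rfl
        | some pm =>
          obtain ⟨p, m⟩ := pm
          obtain ⟨H1, _, _⟩ := bestFold_some vl none p m hB
          rcases H1 with H1 | ⟨ls, hmem, hne, _⟩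
          · exact absurd H1 (by simp)
          · have hkey : p ∈ PySem.List.sorted (vl.map Prod.fst) (fun x => x) :=
              hperm.mem_iff.mpr (List.mem_map.mpr ⟨(p, ls), hmem, rfl⟩)
            have hcontra := (findFallback_none_iff _ vl).mp hA p hkey
            rw [lookup_of_nodup hpre hmem] at hcontra
            exact absurd hcontra hne
      | some qn =>
        obtain ⟨q, n⟩ := qn
        obtain ⟨hq1, hq2, hq3, hq4⟩ := findFallback_some _ vl q n hpw hA
        obtain ⟨lsq, hlq⟩ : ∃ lsq, List.lookup q vl = some lsq := by
          cases hl : List.lookup q vl with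
          | none => rw [hl] at hq2; simp at hq2
          | some lsq => exact ⟨lsq, rfl⟩
        rw [hlq] at hq2 hq3
        simp only [Option.getD_some] at hq2 hq3
        have hqmem : (q, lsq) ∈ vl := lookup_mem hlq
        cases hB : bestFold none vl with
        | none =>
          have hall := (bestFold_none_iff vl none).mp hB
          exact absurd (hall.2 (q, lsq) hqmem) hq2
        | some pm =>
          obtain ⟨p, m⟩ := pm
          obtain ⟨H1, H2, _⟩ := bestFold_some vl none p m hB
          rcases H1 with H1 | ⟨ls, hmem, hne, hmeq⟩
          · exact absurd H1 (by simp)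
          · have hpq : p ≤ q := H2 (q, lsq) hqmem hq2
            have hqp : q ≤ p := by
              have hkey : p ∈ PySem.List.sorted (vl.map Prod.fst) (fun x => x) :=
                hperm.mem_iff.mpr (List.mem_map.mpr ⟨(p, ls), hmem, rfl⟩)
              refine hq4 p hkey ?_
              rw [lookup_of_nodup hpre hmem]
              simpa using hne
            have heq : p = q := le_antisymm hpq hqp
            subst heq
            have hll : List.lookup p vl = some ls := lookup_of_nodup hpre hmem
            rw [hlq] at hll
            injection hll with hll
            subst hll
            rw [hq3, hmeq]
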